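-- pv_equiv track=rewrite | github.com/dqgthb/algorithms | 15904/main.py | solve
-- ===== SOURCE A (Python) =====
-- def solve(str_, abbrev):
--     if len(abbrev) == 0:
--         return True
--     idx = str_.find(abbrev[0])
--     if idx == -1:
--         return False
--     else:
--         return solve(str_[idx+1:], abbrev[1:])
-- ===== SOURCE B (Python) =====
-- def solve(str_, abbrev):
--     # Two-pointer single pass: walk str_ once, advancing a cursor into abbrev on each match.
--     j = 0
--     m = len(abbrev)
--     for ch in str_:
--         if j < m and ch == abbrev[j]:
--             j += 1
--     return j == m
-- ===== Notes on version B (the rewrite author's own statement) =====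
-- stated objective: faster
-- what changed: Replaced the recursive find-then-slice greedy (each step scans with str.find and rebuilds both strings by slicing) with a single left-to-right pass over str_ keeping a cursor into abbrev; no slicing, no recursion.
import Mathlib
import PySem

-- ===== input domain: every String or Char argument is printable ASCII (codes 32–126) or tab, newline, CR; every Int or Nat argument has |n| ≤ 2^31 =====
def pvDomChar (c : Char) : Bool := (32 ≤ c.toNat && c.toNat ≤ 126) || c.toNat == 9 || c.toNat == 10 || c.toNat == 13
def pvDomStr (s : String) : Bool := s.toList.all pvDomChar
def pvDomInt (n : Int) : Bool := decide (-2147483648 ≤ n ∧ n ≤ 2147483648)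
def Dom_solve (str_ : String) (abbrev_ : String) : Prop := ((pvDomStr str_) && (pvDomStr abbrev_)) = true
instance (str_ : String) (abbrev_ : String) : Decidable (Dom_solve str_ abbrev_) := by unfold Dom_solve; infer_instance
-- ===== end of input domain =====

-- B replaces A's recursive find-and-slice greedy with a single left-to-right pass
-- over str_ keeping a cursor into abbrev (objective: faster, no slicing/rescanning).

-- ===== PORT A =====
-- A's recursion: empty abbrev ⇒ True; else find abbrev[0] in str_, fail on -1,
-- else recurse on str_[idx+1:] and abbrev[1:].
def solveA : List Char → List Char → Bool
  | _, [] => true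
  | s, c :: rest =>
    let idx : Int := PySem.Chars.find s [c]
    if idx == -1 then false
    else solveA (PySem.List.slice s (some (idx + 1)) none) rest

def solve (str_ : String) (abbrev_ : String) : Bool :=
  solveA str_.toList abbrev_.toList

-- ===== PORT B =====
-- Source B's loop: for ch in str_: if j < m and ch == abbrev[j]: j += 1; return j == m
def solve_alt (str_ : String) (abbrev_ : String) : Bool :=
  let a := abbrev_.toList
  let m := a.length
  let j := str_.toList.foldl
    (fun j ch => if h : j < m then (if ch == a[j] then j + 1 else j) else j) 0
  j == m

-- ===== PRECONDITION & SPEC =====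
def Spec_solve (str_ : String) (abbrev_ : String) (out : Bool) : Prop := out = solve_alt str_ abbrev_
instance (str_ : String) (abbrev_ : String) (out : Bool) : Decidable (Spec_solve str_ abbrev_ out) := by unfold Spec_solve; infer_instance

-- ===== CLAIM (what is proved, stated in full; the proofs are below) =====
def Claim_equal_solve : Prop := ∀ (str_ : String) (abbrev_ : String), Dom_solve str_ abbrev_ → Spec_solve str_ abbrev_ (solve str_ abbrev_)

-- ===== LEMMAS AND PROOFS =====

-- Common reference form: structural two-pointer subsequence test.
def isSub : List Char → List Char → Bool
  | _, [] => true
  | [], _ :: _ => false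
  | b :: s, c :: rest => if b == c then isSub s rest else isSub s (c :: rest)

-- find s [c] = -1 exactly when c ∉ s
theorem find_singleton_eq_neg_one_iff (s : List Char) (c : Char) :
    PySem.Chars.find s [c] = -1 ↔ c ∉ s := by
  rw [PySem.Chars.find_eq_neg_one_iff, List.singleton_infix_iff]

theorem idxOf_le_of_getElem (s : List Char) (c : Char) (i : Nat) (hi : i < s.length)
    (h : s[i] = c) : s.idxOf c ≤ i := by
  induction s generalizing i with
  | nil => simp at hi
  | cons b s' ih =>
    by_cases hbc : b = c
    · subst hbc; simp [List.idxOf_cons_self]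
    · cases i with
      | zero => simp at h; exact absurd h hbc
      | succ i' =>
        rw [List.idxOf_cons_ne _ hbc]
        have := ih i' (by simpa using hi) (by simpa using h)
        omega

-- when present, find s [c] is the first index of c
theorem find_singleton_of_mem (s : List Char) (c : Char) (h : c ∈ s) :
    PySem.Chars.find s [c] = (s.idxOf c : Int) := by
  have hne : PySem.Chars.find s [c] ≠ -1 := fun h' =>
    (find_singleton_eq_neg_one_iff s c).mp h' h
  have hspec := PySem.Chars.findFrom_natCast_spec s [c] 0 (Nat.zero_le _)
    (by simpa using hne)
  simp only [Nat.cast_zero, PySem.Chars.findFrom_zero] at hspec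
  obtain ⟨h0, hpre, hmin⟩ := hspec
  set f := PySem.Chars.find s [c] with hf
  have hget : s[f.toNat]? = some c := by
    rcases hpre with ⟨t, ht⟩
    have : (s.drop f.toNat)[0]? = some c := by rw [← ht]; rfl
    simpa [List.getElem?_drop] using this
  have hlt : f.toNat < s.length := by
    by_contra hge
    rw [List.getElem?_eq_none (by omega)] at hget; simp at hget
  have hgetE : s[f.toNat] = c := by
    have := (List.getElem?_eq_getElem hlt) ▸ hget
    exact Option.some.inj this
  have hle1 : s.idxOf c ≤ f.toNat := idxOf_le_of_getElem s c f.toNat hlt hgetE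
  have hle2 : f.toNat ≤ s.idxOf c := by
    by_contra hlt2
    rw [Nat.not_le] at hlt2
    have hIlt : s.idxOf c < s.length := List.idxOf_lt_length_of_mem h
    have hpre2 : [c] <+: s.drop (s.idxOf c) := by
      have hg : (s.drop (s.idxOf c))[0]? = some c := by
        simp [List.getElem?_drop, List.getElem?_eq_getElem hIlt, List.getElem_idxOf]
      rcases hd : s.drop (s.idxOf c) with _ | ⟨x, xs⟩
      · rw [hd] at hg; simp at hg
      · rw [hd] at hg; simp at hg
        exact ⟨xs, by rw [hg]; rfl⟩
    exact hmin (s.idxOf c) (Nat.zero_le _) hlt2 hpre2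
  omega

-- one unfolding of A's recursion, in terms of membership / first index
theorem solveA_cons (s : List Char) (c : Char) (rest : List Char) :
    solveA s (c :: rest)
      = if c ∈ s then solveA (s.drop (s.idxOf c + 1)) rest else false := by
  by_cases hmem : c ∈ s
  · rw [if_pos hmem]
    have hfind := find_singleton_of_mem s c hmem
    simp only [solveA, hfind]
    rw [if_neg (by simp only [beq_iff_eq]; omega)]
    have hcast : ((s.idxOf c : Nat) : Int) + 1 = ((s.idxOf c + 1 : Nat) : Int) := by
      push_cast; ring
    rw [hcast, PySem.List.slice_from_natCast]
  · have hfind : PySem.Chars.find s [c] = -1 :=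
      (find_singleton_eq_neg_one_iff s c).mpr hmem
    simp [solveA, hfind, hmem]

-- one unfolding of the two-pointer form, same shape
theorem isSub_cons (s : List Char) (c : Char) (rest : List Char) :
    isSub s (c :: rest)
      = if c ∈ s then isSub (s.drop (s.idxOf c + 1)) rest else false := by
  induction s with
  | nil => simp [isSub]
  | cons b s' ih =>
    by_cases hbc : b = c
    · subst hbc
      rw [isSub, if_pos (by simp)]
      rw [if_pos (List.mem_cons_self), List.idxOf_cons_self]
      simp
    · rw [isSub, if_neg (by simp [hbc]), ih]
      have hmem : (c ∈ b :: s') = (c ∈ s') := by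
        simp only [List.mem_cons, eq_iff_iff, or_iff_right_iff_imp]
        intro h; exact absurd h.symm hbc
      rw [List.idxOf_cons_ne _ hbc]
      by_cases hm : c ∈ s'
      · rw [if_pos hm, if_pos (by rw [hmem]; exact hm)]
        rfl
      · rw [if_neg hm, if_neg (by rw [hmem]; exact hm)]

-- A equals the two-pointer form
theorem solveA_eq_isSub (a s : List Char) : solveA s a = isSub s a := by
  induction a generalizing s with
  | nil => cases s <;> rfl
  | cons c rest ih =>
    rw [solveA_cons, isSub_cons]
    by_cases hm : c ∈ s
    · rw [if_pos hm, if_pos hm, ih]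
    · rw [if_neg hm, if_neg hm]

-- B's loop step
def tpStep (a : List Char) (j : Nat) (ch : Char) : Nat :=
  if h : j < a.length then (if ch == a[j] then j + 1 else j) else j

theorem foldl_tpStep_full (a : List Char) (s : List Char) :
    s.foldl (tpStep a) a.length = a.length := by
  induction s with
  | nil => rfl
  | cons ch s' ih =>
    simp only [List.foldl_cons, tpStep, dif_neg (lt_irrefl a.length)]; exact ih

theorem foldl_tpStep_eq_isSub (a : List Char) (s : List Char) (j : Nat) (hj : j ≤ a.length) :
    ((s.foldl (tpStep a) j) == a.length) = isSub s (a.drop j) := by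
  induction s generalizing j with
  | nil =>
    rcases Nat.lt_or_ge j a.length with hlt | hge
    · have hne : a.drop j ≠ [] := by
        intro h; have := congrArg List.length h; simp at this; omega
      rcases hd : a.drop j with _ | ⟨x, xs⟩
      · exact absurd hd hne
      · simp only [List.foldl_nil, isSub]
        simp [Nat.ne_of_lt hlt]
    · have hj' : j = a.length := Nat.le_antisymm hj hge
      subst hj'
      simp [isSub, List.drop_length]
  | cons ch s' ih =>
    simp only [List.foldl_cons]
    rcases Nat.lt_or_ge j a.length with hlt | hge
    · have hd : a.drop j = a[j] :: a.drop (j + 1) := by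
        rw [List.drop_eq_getElem_cons hlt]
      rw [hd]
      simp only [tpStep, dif_pos hlt]
      by_cases hc : ch = a[j]
      · rw [if_pos (by simp [hc]), isSub, if_pos (by simp [hc])]
        exact ih (j + 1) hlt
      · rw [if_neg (by simp [hc]), isSub, if_neg (by simp [hc])]
        rw [ih j hj, hd]
    · have hj' : j = a.length := Nat.le_antisymm hj hge
      subst hj'
      simp only [tpStep, dif_neg (lt_irrefl a.length)]
      rw [List.drop_length, isSub]
      simp [foldl_tpStep_full]

-- ===== VERDICT (by name: the statement is the Claim_ definition above) =====
theorem solve_spec : Claim_equal_solve := by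
  intro str_ abbrev_ _
  unfold Spec_solve solve solve_alt
  rw [solveA_eq_isSub]
  have h := foldl_tpStep_eq_isSub abbrev_.toList str_.toList 0 (Nat.zero_le _)
  simp only [List.drop_zero] at h
  rw [← h]
  rfl
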